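-- pv_equiv track=rewrite | github.com/NadiaDaszczuk/Trabajos-Stark | trabajo_practico_5.py | calcular_max_genero
-- ===== SOURCE A (Python) =====
-- def capitalizar_palabras(cadena:str)-> str:
--     '''Permite capitalizar las palabras que se ingresen como párametro, de no ser de tipo STR retorna N/A, sino retorna la cadena con todas sus palabras capitalizadas'''
--     if type(cadena) != str:
--         return "N/A"
--
--     palabras = cadena.split()
--
--
--     cadena = " ".join(palabra.capitalize() for palabra in palabras)
--
--     return cadena
--
-- def obtener_nombre_capitalizado(heroe:dict) -> str:
--     '''Retorna el nombre capitalizado del diccionario que se ingrese por párametro'''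
--     if type(heroe) != dict or len(heroe) <= 0:
--         return "N/A"
--
--     if "nombre" in heroe:
--         nombre_cap = capitalizar_palabras(heroe["nombre"])
--
--     return nombre_cap
--
-- def obtener_nombre_y_dato_tp_5(heroe:dict, clave:str)->str:
--     '''Obtiene el nombre y el dato de la clave que se solicite'''
--     if len(heroe) <= 0:
--         return False
--
--     nombre = obtener_nombre_capitalizado(heroe)
--
--     if nombre is not False:
--         dato = heroe[clave]
--
--     mensaje = f"{nombre} | {clave.capitalize()} : {dato}"
--
--     return mensaje
--
-- def es_genero(heroe:dict, genero:str):
--     '''Evalúa género, se indica por párametro un diccionario y un string género('M','N','NB') retorna True en caso de que coincida el genero del diccionario con el genero ingresado y False en caso de que no sea de tipo diccionario, que no tenga la clave genero, que no se encuentre entre 'M', 'F','NB' o que no coincida con el genero que se paso por párametro'''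
--     if type(heroe) != dict:
--         return False
--
--     if 'genero' not in heroe:
--         return False
--
--     genero = genero.upper()
--
--     if genero not in ["M", "F", "NB"]:
--         return False
--     else:
--         if heroe["genero"] == genero:
--             return True
--         else:
--             return False
--
-- def calcular_max_genero(lista:list, clave:str, genero:str)->str:
--     ''' Permite obtener el nombre del maximo del género que se pase por párametro, debe ingresar la lista, la clave genero y el tipo de genero retorna un string con el nombre del heroe '''
--     if type(lista) != list:
--         return "N/A"
--
--     genero = genero.upper()
--
--     if genero not in ['M', 'F', 'NB']:
--         return 'N/A'
--
--     maximo = None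
--
--     for heroe in lista:
--
--         if es_genero(heroe, genero) and ( maximo == None or maximo < heroe[clave]):
--             maximo = heroe[clave]
--             nombre_heroe = obtener_nombre_y_dato_tp_5(heroe, clave)
--
--     if maximo != None:
--         return nombre_heroe
--     else:
--         return None
-- ===== SOURCE B (Python) =====
-- # B: instead of A's fused running-max loop that threads (maximo, nombre_heroe) mutable
-- # state through helper calls, B stages the work: filter the matching heroes, take the
-- # maximal clave value, pick the first hero attaining it, and format the message inline.
--
-- def calcular_max_genero(lista, clave, genero):
--     if type(lista) != list:
--         return "N/A"
--     genero = genero.upper()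
--     if genero not in ('M', 'F', 'NB'):
--         return 'N/A'
--     filtrados = [h for h in lista if h.get('genero') == genero]
--     if not filtrados:
--         return None
--     mejor = max(h[clave] for h in filtrados)
--     ganador = next(h for h in filtrados if h[clave] == mejor)
--     nombre = " ".join(p.capitalize() for p in ganador["nombre"].split())
--     return f"{nombre} | {clave.capitalize()} : {mejor}"
-- ===== Notes on version B (the rewrite author's own statement) =====
-- stated objective: alternative
-- what changed: A's single fused loop threading a running maximum and a precomputed message through mutable state and three helpers is replaced by staged passes: filter the matching heroes, compute the maximal clave value with max(), locate the first hero attaining it with next(), and format the message inline without A's helper chain.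
import Mathlib
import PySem

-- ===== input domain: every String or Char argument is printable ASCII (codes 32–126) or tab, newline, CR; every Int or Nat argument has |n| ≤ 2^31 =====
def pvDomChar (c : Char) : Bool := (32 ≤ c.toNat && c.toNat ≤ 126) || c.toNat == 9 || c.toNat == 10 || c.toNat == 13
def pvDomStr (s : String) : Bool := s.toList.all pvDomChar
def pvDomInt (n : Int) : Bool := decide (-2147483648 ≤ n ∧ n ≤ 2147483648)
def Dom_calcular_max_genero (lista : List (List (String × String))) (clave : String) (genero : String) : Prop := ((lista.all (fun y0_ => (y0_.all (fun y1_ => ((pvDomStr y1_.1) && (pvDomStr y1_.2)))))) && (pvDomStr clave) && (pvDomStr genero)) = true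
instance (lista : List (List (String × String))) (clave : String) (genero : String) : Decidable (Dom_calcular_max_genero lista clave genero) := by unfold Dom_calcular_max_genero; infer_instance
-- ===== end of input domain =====

-- B replaces A's fused running-max loop and helper chain by staged passes: filter the
-- matching heroes, take max() of the clave values, find the first hero attaining it,
-- and format the message inline (objective: alternative).
-- ===== PORT A =====
-- dict lookup (first match, per the association-list convention)
def pvLookup (h : List (String × String)) (k : String) : Option String :=
  (h.find? (fun p => p.1 == k)).map (fun p => p.2)

-- heroe[clave]: Python raises KeyError when the key is absent; those inputs are outside Pre_
def pvGet (h : List (String × String)) (k : String) : String :=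
  (pvLookup h k).getD ""

-- str.capitalize(): first char upper-cased, rest lower-cased (exact on the ASCII domain)
def pvCapitalize (s : String) : String :=
  match s.toList with
  | [] => ""
  | c :: rest => String.ofList (PySem.Chars.upperChar c :: PySem.Chars.lower rest)

def capitalizar_palabras (cadena : String) : String :=
  PySem.Str.join " " ((PySem.Str.split₀ cadena).map pvCapitalize)

def obtener_nombre_capitalizado (heroe : List (String × String)) : String :=
  if heroe.length ≤ 0 then "N/A"
  else match pvLookup heroe "nombre" with
    | some v => capitalizar_palabras v
    | none => ""   -- Python: UnboundLocalError (nombre_cap unbound); such inputs lie outside Pre_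

def obtener_nombre_y_dato_tp_5 (heroe : List (String × String)) (clave : String) : String :=
  if heroe.length ≤ 0 then ""  -- Python returns False here; unreachable from both ports (caller's hero has the 'genero' key)
  else
    let nombre := obtener_nombre_capitalizado heroe
    let dato := pvGet heroe clave
    nombre ++ " | " ++ pvCapitalize clave ++ " : " ++ dato

def es_genero (heroe : List (String × String)) (genero : String) : Bool :=
  match pvLookup heroe "genero" with
  | none => false
  | some v =>
    let g := PySem.Str.upper genero
    if g ≠ "M" ∧ g ≠ "F" ∧ g ≠ "NB" then false
    else v == g

def calcular_max_genero (lista : List (List (String × String))) (clave : String) (genero : String) : Option String :=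
  let g := PySem.Str.upper genero
  if g ≠ "M" ∧ g ≠ "F" ∧ g ≠ "NB" then some "N/A"
  else
    let st := lista.foldl (fun (st : Option String × String) heroe =>
      if es_genero heroe g && (match st.1 with
          | none => true
          | some m => decide (m < pvGet heroe clave)) then
        (some (pvGet heroe clave), obtener_nombre_y_dato_tp_5 heroe clave)
      else st) (none, "")
    match st.1 with
    | some _ => some st.2
    | none => none

-- ===== PORT B =====
def calcular_max_genero_alt (lista : List (List (String × String))) (clave : String) (genero : String) : Option String :=
  let g := PySem.Str.upper genero
  if g ≠ "M" ∧ g ≠ "F" ∧ g ≠ "NB" then some "N/A"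
  else
    let filtrados := lista.filter (fun h => pvLookup h "genero" == some g)
    if filtrados.isEmpty then none
    else
      -- max(h[clave] for h in filtrados)
      let mejor := (PySem.List.max? (filtrados.map (fun h => pvGet h clave)) (fun s => s)).getD ""
      -- next(h for h in filtrados if h[clave] == mejor)
      let ganador := (filtrados.find? (fun h => pvGet h clave == mejor)).getD []
      -- ganador["nombre"]: Python raises KeyError when absent; outside Pre_ (getD "" there)
      let nombre := PySem.Str.join " " ((PySem.Str.split₀ ((pvLookup ganador "nombre").getD "")).map pvCapitalize)
      some (nombre ++ " | " ++ pvCapitalize clave ++ " : " ++ mejor)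

-- ===== PRECONDITION & SPEC =====
def pvHero (lista : List (List (String × String))) (i : Nat) : List (String × String) := lista.getD i []

-- Pre_ excludes exactly the inputs where Python A raises: with a valid gender, every hero of that
-- gender must carry the clave key (KeyError in the comparison/update otherwise), and every hero of
-- that gender whose clave value strictly exceeds all earlier same-gender values — the heroes that
-- win an update — must carry the 'nombre' key (UnboundLocalError otherwise).
def Pre_calcular_max_genero (lista : List (List (String × String))) (clave : String) (genero : String) : Prop :=
  (PySem.Str.upper genero = "M" ∨ PySem.Str.upper genero = "F" ∨ PySem.Str.upper genero = "NB") →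
  ∀ i, i < lista.length →
    pvLookup (pvHero lista i) "genero" = some (PySem.Str.upper genero) →
      (pvLookup (pvHero lista i) clave).isSome = true ∧
      ((∀ j, j < i → pvLookup (pvHero lista j) "genero" = some (PySem.Str.upper genero) →
          pvGet (pvHero lista j) clave < pvGet (pvHero lista i) clave) →
        (pvLookup (pvHero lista i) "nombre").isSome = true)

instance (lista : List (List (String × String))) (clave : String) (genero : String) : Decidable (Pre_calcular_max_genero lista clave genero) := by unfold Pre_calcular_max_genero; infer_instance

def pvWitness_calcular_max_genero : (List (List (String × String))) × String × String :=
  ([[("genero", "M"), ("nombre", "ana paz"), ("poder", "88")], [("genero", "F"), ("poder", "9")]], "poder", "m")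

def Spec_calcular_max_genero (lista : List (List (String × String))) (clave : String) (genero : String) (out : Option String) : Prop := out = calcular_max_genero_alt lista clave genero
instance (lista : List (List (String × String))) (clave : String) (genero : String) (out : Option String) : Decidable (Spec_calcular_max_genero lista clave genero out) := by unfold Spec_calcular_max_genero; infer_instance

-- ===== CLAIM (what is proved, stated in full; the proofs are below) =====
def Claim_equal_calcular_max_genero : Prop := ∀ (lista : List (List (String × String))) (clave : String) (genero : String), Dom_calcular_max_genero lista clave genero → Pre_calcular_max_genero lista clave genero → Spec_calcular_max_genero lista clave genero (calcular_max_genero lista clave genero)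

-- ===== LEMMAS AND PROOFS =====
-- one step of Python max / of A's strict-< update: keep the earlier element on ties
def pvMaxStep {α : Type} (key : α → String) (a : Option α) (x : α) : Option α :=
  match a with
  | none => some x
  | some m => if key m < key x then some x else some m

lemma pvMax?_eq_foldl {α : Type} (xs : List α) (key : α → String) :
    PySem.List.max? xs key = xs.foldl (pvMaxStep key) none := rfl

-- A's fused loop computes the state of the first maximal element of the filtered list.
lemma pvLoop {α : Type} (P : α → Bool) (key msg : α → String) :
    ∀ (l : List α) (acc : Option α),
      List.foldl (fun (st : Option String × String) h =>
          if P h && (match st.1 with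
              | none => true
              | some m => decide (m < key h)) then (some (key h), msg h) else st)
        (match acc with | none => (none, "") | some w => (some (key w), msg w)) l
      = match List.foldl (pvMaxStep key) acc (l.filter P) with
        | none => (none, "") | some w => (some (key w), msg w) := by
  intro l
  induction l with
  | nil => intro acc; rfl
  | cons h t ih =>
    intro acc
    by_cases hp : P h = true
    · cases acc with
      | none =>
        simpa [List.foldl_cons, List.filter_cons, hp, pvMaxStep] using ih (some h)
      | some w =>
        by_cases hlt : (key w).toList < (key h).toList
        · simpa [List.foldl_cons, List.filter_cons, hp, hlt, pvMaxStep] using ih (some h)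
        · simpa [List.foldl_cons, List.filter_cons, hp, hlt, pvMaxStep] using ih (some w)
    · simp only [Bool.not_eq_true] at hp
      simpa [List.foldl_cons, List.filter_cons, hp] using ih acc

-- the first-max fold commutes with mapping the key out
lemma pvMaxStep_map {α : Type} (key : α → String) :
    ∀ (xs : List α) (acc : Option α),
      List.foldl (pvMaxStep (fun s => s)) (acc.map key) (xs.map key)
        = (List.foldl (pvMaxStep key) acc xs).map key := by
  intro xs
  induction xs with
  | nil => intro acc; rfl
  | cons x t ih =>
    intro acc
    have hstep : pvMaxStep (fun s => s) (acc.map key) (key x) = (pvMaxStep key acc x).map key := by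
      cases acc with
      | none => rfl
      | some m => by_cases h : key m < key x <;> simp [pvMaxStep, h]
    simp only [List.map_cons, List.foldl_cons, hstep, ih]

-- the first-max fold result is the first element whose key equals its key,
-- and its key bounds the key of the start element
lemma pvFoldFind {α : Type} (key : α → String) :
    ∀ (xs : List α) (b : α), ∃ w,
      List.foldl (pvMaxStep key) (some b) xs = some w ∧
      key b ≤ key w ∧
      (b :: xs).find? (fun y => key y == key w) = some w := by
  intro xs
  induction xs with
  | nil =>
    intro b
    exact ⟨b, rfl, le_refl _, by simp [List.find?]⟩
  | cons x t ih =>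
    intro b
    by_cases hbx : key b < key x
    · obtain ⟨w, hw, hle, hfind⟩ := ih x
      refine ⟨w, ?_, le_of_lt (lt_of_lt_of_le hbx hle), ?_⟩
      · simpa [List.foldl_cons, pvMaxStep, hbx] using hw
      · have hne : (key b == key w) = false := by
          simp only [beq_eq_false_iff_ne, ne_eq]
          exact fun h => absurd (h ▸ lt_of_lt_of_le hbx hle) (lt_irrefl _)
        simpa [List.find?, hne] using hfind
    · obtain ⟨w, hw, hle, hfind⟩ := ih b
      refine ⟨w, ?_, hle, ?_⟩
      · simpa [List.foldl_cons, pvMaxStep, hbx] using hw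
      · rcases hbw : (key b == key w) with _ | _
        · -- b does not match: x cannot match either (key x ≤ key b ≤ key w, equality would force b to match)
          have hxb : key x ≤ key b := le_of_not_gt hbx
          have hbw' : key b ≠ key w := by simpa [beq_eq_false_iff_ne] using hbw
          have hxw : (key x == key w) = false := by
            simp only [beq_eq_false_iff_ne, ne_eq]
            intro h
            exact hbw' (le_antisymm hle (h ▸ hxb))
          have htail : t.find? (fun y => key y == key w) = some w := by
            simpa [List.find?, hbw] using hfind
          simp [List.find?, hbw, hxw, htail]
        · -- b matches: it is the first match in (b :: xs) too, and then w = b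
          have : w = b := by
            have := hfind
            simp [List.find?, hbw] at this
            exact this.symm
          subst this
          simp [List.find?, hbw]

-- a hero taken from the gender filter is a non-empty association list
lemma pvMemFilter_ne_nil (w : List (String × String)) (lista : List (List (String × String))) (g : String)
    (hmem : w ∈ lista.filter (fun h => pvLookup h "genero" == some g)) : ¬ w.length ≤ 0 := by
  have hpred := List.of_mem_filter hmem
  intro hlen
  have : w = [] := List.eq_nil_of_length_eq_zero (Nat.le_zero.mp hlen)
  subst this
  simp [pvLookup] at hpred

lemma es_genero_eq (h : List (String × String)) (g : String)
    (hg : g = "M" ∨ g = "F" ∨ g = "NB") :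
    es_genero h g = (pvLookup h "genero" == some g) := by
  have hup : PySem.Str.upper g = g := by rcases hg with rfl | rfl | rfl <;> rfl
  have hvalid : ¬ (PySem.Str.upper g ≠ "M" ∧ PySem.Str.upper g ≠ "F" ∧ PySem.Str.upper g ≠ "NB") := by
    rw [hup]; rcases hg with rfl | rfl | rfl <;> simp
  unfold es_genero
  cases hlk : pvLookup h "genero" with
  | none => simp
  | some v =>
    simp only [hup, if_neg hvalid]
    simp
    exact fun _ => hg

-- ===== VERDICT (by name: the statement is the Claim_ definition above) =====
theorem calcular_max_genero_spec : Claim_equal_calcular_max_genero := by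
  intro lista clave genero _hDom _hPre
  unfold Spec_calcular_max_genero calcular_max_genero calcular_max_genero_alt
  by_cases hg : PySem.Str.upper genero ≠ "M" ∧ PySem.Str.upper genero ≠ "F" ∧ PySem.Str.upper genero ≠ "NB"
  · simp [hg]
  · simp only [if_neg hg]
    set g := PySem.Str.upper genero with hgdef
    have hg3 : g = "M" ∨ g = "F" ∨ g = "NB" := by
      by_contra hcon
      push_neg at hcon
      exact hg ⟨hcon.1, hcon.2.1, hcon.2.2⟩
    -- A's loop = first-max over the filtered list
    have hloop := pvLoop (fun h => es_genero h g)
      (fun h => pvGet h clave) (fun h => obtener_nombre_y_dato_tp_5 h clave) lista none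
    simp only at hloop
    rw [hloop]
    -- align the two filters
    have hfe : lista.filter (fun h => es_genero h g)
        = lista.filter (fun h => pvLookup h "genero" == some g) :=
      List.filter_congr (fun h _ => es_genero_eq h g hg3)
    rw [hfe]
    cases hF : lista.filter (fun h => pvLookup h "genero" == some g) with
    | nil => simp
    | cons x xs =>
      obtain ⟨w, hw, _hle, hfind⟩ := pvFoldFind (fun h => pvGet h clave) xs x
      have hfold : List.foldl (pvMaxStep (fun h => pvGet h clave)) none (x :: xs) = some w := by
        simpa [List.foldl_cons, pvMaxStep] using hw
      have hmejor : (PySem.List.max? ((x :: xs).map (fun h => pvGet h clave)) (fun s => s)).getD ""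
          = pvGet w clave := by
        rw [pvMax?_eq_foldl]
        have := pvMaxStep_map (fun h => pvGet h clave) (x :: xs) none
        simp only [Option.map_none] at this
        rw [this, hfold]
        rfl
      rw [hfold]
      simp only [List.isEmpty_cons, if_neg (by simp : ¬ (false = true)), hmejor, hfind]
      have hwmem : w ∈ lista.filter (fun h => pvLookup h "genero" == some g) := by
        rw [hF]; exact List.mem_of_find?_eq_some hfind
      have hwlen : ¬ w.length ≤ 0 := pvMemFilter_ne_nil w lista g hwmem
      -- both messages coincide
      unfold obtener_nombre_y_dato_tp_5 obtener_nombre_capitalizado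
      rw [if_neg hwlen, if_neg hwlen]
      simp only [Option.getD_some]
      cases hnom : pvLookup w "nombre" with
      | some v => simp [hnom, capitalizar_palabras]
      | none =>
        have hempty : PySem.Str.join " " ((PySem.Str.split₀ "").map pvCapitalize) = "" := by decide
        simp [hnom, hempty]
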